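-- pv_equiv track=rewrite | github.com/tobiasHeinke/monostyle | monostyle/util/lexicon.py | lower_first
-- ===== SOURCE A (Python) =====
-- def lower_first(word_str):
--     """Lower case of first char in hyphened compound."""
--     new_word = []
--     for compound in word_str.split('-'):
--         if len(compound) != 0:
--             new_word.append(compound[0].lower() + compound[1:])
--         else:
--             new_word.append(compound)
--
--     return '-'.join(new_word)
-- ===== SOURCE B (Python) =====
-- def lower_first(word_str):
--     """Lower case of first char in hyphened compound."""
--     out = []
--     prev = '-'
--     for ch in word_str:
--         out.append(ch.lower() if prev == '-' else ch)
--         prev = ch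
--     return ''.join(out)
-- ===== Notes on version B (the rewrite author's own statement) =====
-- stated objective: alternative
-- what changed: Replaces split-on-'-'/per-compound-lowercase/rejoin with a single character pass that lowercases a character exactly when it is first or follows a hyphen.
import Mathlib
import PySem

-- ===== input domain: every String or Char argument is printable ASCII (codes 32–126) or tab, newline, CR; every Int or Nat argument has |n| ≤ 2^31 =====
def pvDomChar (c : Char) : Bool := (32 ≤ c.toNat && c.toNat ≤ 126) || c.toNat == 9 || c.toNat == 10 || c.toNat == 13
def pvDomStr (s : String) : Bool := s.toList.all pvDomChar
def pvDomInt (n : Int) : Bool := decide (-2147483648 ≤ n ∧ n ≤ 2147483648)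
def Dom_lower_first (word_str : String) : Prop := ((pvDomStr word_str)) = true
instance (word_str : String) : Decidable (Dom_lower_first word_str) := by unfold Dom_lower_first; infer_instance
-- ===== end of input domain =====

-- B replaces A's split-on-'-'/lowercase-each-compound/rejoin with one character pass (alternative decomposition, same cost).

-- ===== PORT A =====
-- compound[0].lower() + compound[1:]  (used only on nonempty compounds; exact there)
def lowerCompound (compound : String) : String :=
  match compound.toList with
  | [] => compound
  | c :: rest => String.ofList (PySem.Chars.lowerChar c :: rest)

def lower_first (word_str : String) : String :=
  let new_word := ((PySem.Str.split? word_str "-").getD []).foldl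
    (fun acc compound =>
      if PySem.Str.len compound ≠ 0 then acc ++ [lowerCompound compound]
      else acc ++ [compound]) []
  PySem.Str.join "-" new_word

-- ===== PORT B =====
def lowerFirstGo : List Char → Char → List Char
  | [], _ => []
  | c :: rest, prev => (if prev = '-' then PySem.Chars.lowerChar c else c) :: lowerFirstGo rest c

def lower_first_alt (word_str : String) : String :=
  String.ofList (lowerFirstGo word_str.toList '-')

-- ===== PRECONDITION & SPEC =====
def Spec_lower_first (word_str : String) (out : String) : Prop := out = lower_first_alt word_str
instance (word_str : String) (out : String) : Decidable (Spec_lower_first word_str out) := by unfold Spec_lower_first; infer_instance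

-- ===== CLAIM (what is proved, stated in full; the proofs are below) =====
def Claim_equal_lower_first : Prop := ∀ (word_str : String), Dom_lower_first word_str → Spec_lower_first word_str (lower_first word_str)

-- ===== LEMMAS AND PROOFS =====

-- simple structural recursion computing split-on-'-'
def pySplit : List Char → List (List Char)
  | [] => [[]]
  | c :: rest =>
    if c = '-' then [] :: pySplit rest
    else match pySplit rest with
      | p :: ps => (c :: p) :: ps
      | [] => [[c]]

theorem pySplit_ne_nil (l : List Char) : pySplit l ≠ [] := by
  cases l with
  | nil => simp [pySplit]
  | cons c rest =>
    simp only [pySplit]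
    split
    · simp
    · split <;> simp_all

theorem splitOn_go_eq (fuel : Nat) : ∀ (l cur : List Char) (acc : List (List Char)),
    l.length ≤ fuel →
    PySem.Chars.splitOn.go ['-'] fuel l cur acc
      = acc.reverse ++ (pySplit l).modifyHead (cur.reverse ++ ·) := by
  induction fuel with
  | zero =>
    intro l cur acc h
    have : l = [] := by cases l <;> simp_all
    subst this
    simp [PySem.Chars.splitOn.go, pySplit]
  | succ fuel ih =>
    intro l cur acc h
    cases l with
    | nil => simp [PySem.Chars.splitOn.go, pySplit]
    | cons c rest =>
      by_cases hc : c = '-'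
      · subst hc
        have hpre : List.isPrefixOf ['-'] ('-' :: rest) = true := by
          simp [List.isPrefixOf]
        rw [PySem.Chars.splitOn.go]
        simp only [hpre, if_true]
        have hd : List.drop ['-'].length ('-' :: rest) = rest := rfl
        rw [hd]
        rw [ih rest [] (cur.reverse :: acc)
          (by simpa using Nat.le_of_succ_le_succ h)]
        simp only [pySplit, List.reverse_cons, List.reverse_nil, List.nil_append,
          List.append_assoc, List.modifyHead]
        rcases pySplit rest with _ | ⟨p, ps⟩ <;> simp
      · have hpre : List.isPrefixOf ['-'] (c :: rest) = false := by
          simp [List.isPrefixOf]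
          intro h'; exact absurd h'.symm hc
        rw [PySem.Chars.splitOn.go]
        simp only [hpre]
        rw [if_neg (by simp)]
        rw [ih rest (c :: cur) acc (by simpa using Nat.le_of_succ_le_succ h)]
        simp only [pySplit, if_neg hc]
        rcases hps : pySplit rest with _ | ⟨p, ps⟩
        · exact absurd hps (pySplit_ne_nil rest)
        · simp

theorem splitOn_eq (cs : List Char) : PySem.Chars.splitOn cs ['-'] = pySplit cs := by
  rw [PySem.Chars.splitOn, splitOn_go_eq (cs.length + 1) cs [] [] (by omega)]
  rcases h : pySplit cs with _ | ⟨p, ps⟩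
  · exact absurd h (pySplit_ne_nil cs)
  · simp

theorem lowerChar_dash : PySem.Chars.lowerChar '-' = '-' := by decide

theorem join_cons_head (sep : List Char) (a : Char) (p : List Char) (ps : List (List Char)) :
    PySem.Chars.join sep ((a :: p) :: ps) = a :: PySem.Chars.join sep (p :: ps) := by
  cases ps with
  | nil => simp [PySem.Chars.join_singleton]
  | cons q qs => simp [PySem.Chars.join_cons_cons]

-- main simultaneous induction: joined lowered compounds = single pass
theorem main_eq (cs : List Char) :
    (PySem.Chars.join ['-'] ((pySplit cs).map
        (fun p => match p with | [] => [] | c :: rest => PySem.Chars.lowerChar c :: rest))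
      = lowerFirstGo cs '-')
  ∧ (∀ c, c ≠ '-' →
      PySem.Chars.join ['-'] (match pySplit cs with
        | p :: ps => p :: ps.map (fun p => match p with | [] => [] | c :: rest => PySem.Chars.lowerChar c :: rest)
        | [] => [])
      = lowerFirstGo cs c) := by
  induction cs with
  | nil =>
    refine ⟨?_, fun c hc => ?_⟩ <;>
      simp [pySplit, PySem.Chars.join_singleton, lowerFirstGo]
  | cons x rest ih =>
    obtain ⟨ih1, ih2⟩ := ih
    rcases h : pySplit rest with _ | ⟨p, ps⟩
    · exact absurd h (pySplit_ne_nil rest)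
    rw [h] at ih1 ih2
    simp only [List.map_cons] at ih1
    by_cases hx : x = '-'
    · subst hx
      have step : PySem.Chars.join ['-']
          ((pySplit ('-' :: rest)).map
            (fun p => match p with | [] => [] | c :: r => PySem.Chars.lowerChar c :: r))
          = '-' :: lowerFirstGo rest '-' := by
        simp only [pySplit, reduceIte, h, List.map_cons]
        rw [PySem.Chars.join_cons_cons, ← ih1]
        simp
      refine ⟨?_, fun c hc => ?_⟩
      · rw [step]
        simp [lowerFirstGo, lowerChar_dash]
      · simp only [pySplit, reduceIte]
        have : PySem.Chars.join ['-'] ([] :: (p :: ps).map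
            (fun p => match p with | [] => [] | c :: r => PySem.Chars.lowerChar c :: r))
            = '-' :: lowerFirstGo rest '-' := by
          simp only [List.map_cons]
          rw [PySem.Chars.join_cons_cons, ← ih1]; simp
        rw [h, this]
        simp [lowerFirstGo, hc]
    · refine ⟨?_, fun c hc => ?_⟩
      · simp only [pySplit, if_neg hx, h, List.map_cons]
        rw [join_cons_head, ih2 x hx]
        simp [lowerFirstGo]
      · simp only [pySplit, if_neg hx, h]
        rw [join_cons_head, ih2 x hx]
        simp only [lowerFirstGo, if_neg hc]

-- ===== VERDICT (by name: the statement is the Claim_ definition above) =====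
theorem lower_first_spec : Claim_equal_lower_first := by
  intro w _
  unfold Spec_lower_first lower_first lower_first_alt
  have hsplit : PySem.Str.split? w "-" = some ((pySplit w.toList).map String.ofList) := by
    have hsep : ("-" : String).toList = ['-'] := rfl
    simp [PySem.Str.split?, PySem.Chars.split?, hsep, splitOn_eq]
  rw [hsplit]
  simp only [Option.getD_some]
  have hstep : ∀ (acc : List String) (compound : String),
      (if PySem.Str.len compound ≠ 0 then acc ++ [lowerCompound compound]
       else acc ++ [compound]) = acc ++ [lowerCompound compound] := by
    intro acc compound
    by_cases hl : PySem.Str.len compound ≠ 0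
    · rw [if_pos hl]
    · rw [if_neg hl]
      have hl' : PySem.Str.len compound = 0 := not_not.mp hl
      have h0 : compound = "" := by
        simpa [PySem.Str.len, PySem.Chars.len_eq] using hl'
      subst h0
      rfl
  have hfold : ∀ (l : List String) (acc : List String),
      l.foldl (fun acc compound =>
        if PySem.Str.len compound ≠ 0 then acc ++ [lowerCompound compound]
        else acc ++ [compound]) acc = acc ++ l.map lowerCompound := by
    intro l
    induction l with
    | nil => intro acc; simp
    | cons a as ihl => intro acc; rw [List.foldl_cons, hstep, ihl]; simp
  rw [hfold]
  simp only [List.nil_append, List.map_map]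
  have hcomp : ∀ p : List Char, (lowerCompound ∘ String.ofList) p
      = String.ofList (match p with | [] => [] | c :: rest => PySem.Chars.lowerChar c :: rest) := by
    intro p
    cases p <;> simp [lowerCompound, String.toList_ofList, Function.comp]
  rw [List.map_congr_left (fun p _ => hcomp p)]
  rw [PySem.Str.join]
  have hsep : ("-" : String).toList = ['-'] := rfl
  rw [hsep, List.map_map]
  simp only [Function.comp_def, String.toList_ofList]
  rw [(main_eq w.toList).1]
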